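-- pv_equiv track=rewrite | github.com/fernandogonzalez11/ic1803-taller | tarea_6_Fernando_González.py | indice_palabras
-- ===== SOURCE A (Python) =====
-- def indice_palabras(frases: tuple) -> dict:
--     dict_palabras = {}
--     for i, frase in enumerate(frases):
--         for palabra in frase.split(" "):
--             if palabra not in dict_palabras:
--                 dict_palabras[palabra] = [i + 1]
--             else:
--                 dict_palabras[palabra].append(i + 1)
--
--     return dict_palabras
-- ===== SOURCE B (Python) =====
-- def indice_palabras(frases: tuple) -> dict:
--     pairs = [(palabra, i + 1)
--              for i, frase in enumerate(frases)
--              for palabra in frase.split(" ")]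
--     return {w: [n for w2, n in pairs if w2 == w]
--             for w in dict.fromkeys(w for w, _ in pairs)}
-- ===== Notes on version B (the rewrite author's own statement) =====
-- stated objective: alternative
-- what changed: Replaces A's incremental dict mutation (membership test then insert-or-append per token) with a two-phase decomposition: flatten all (word, phrase-number) occurrences into one list, then build the result as a dict comprehension over the deduplicated words, collecting each word's numbers by filtering the flat list.
import Mathlib
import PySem

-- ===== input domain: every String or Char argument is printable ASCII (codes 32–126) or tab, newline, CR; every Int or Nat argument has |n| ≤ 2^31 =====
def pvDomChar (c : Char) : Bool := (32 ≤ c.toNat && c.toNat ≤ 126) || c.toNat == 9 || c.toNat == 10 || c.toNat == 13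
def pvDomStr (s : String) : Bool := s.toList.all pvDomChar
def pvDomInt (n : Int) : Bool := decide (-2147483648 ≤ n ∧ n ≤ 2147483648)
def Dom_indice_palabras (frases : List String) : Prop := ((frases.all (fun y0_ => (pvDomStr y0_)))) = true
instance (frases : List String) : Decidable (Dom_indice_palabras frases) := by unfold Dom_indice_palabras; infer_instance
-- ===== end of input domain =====

-- B replaces A's incremental dict mutation with a flatten-then-group decomposition (dedup keys + per-key filter); objective: alternative, not faster.


-- ===== PORT A =====
def indice_palabras (frases : List String) : List (String × List Int) :=
  ((PySem.List.enumerate frases).foldl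
    (fun d p =>
      ((PySem.Str.split? p.2 " ").getD []).foldl
        (fun d palabra =>
          if d.contains palabra = false then d.insert palabra [p.1 + 1]
          else d.modify palabra [] (fun v => v ++ [p.1 + 1]))
        d)
    PySem.Dict.empty).items

-- ===== PORT B =====
def indice_palabras_alt (frases : List String) : List (String × List Int) :=
  let pairs := (PySem.List.enumerate frases).flatMap
    (fun p => ((PySem.Str.split? p.2 " ").getD []).map (fun palabra => (palabra, p.1 + 1)))
  (PySem.List.dedup (pairs.map (·.1))).map
    (fun w => (w, (pairs.filter (fun q => q.1 == w)).map (·.2)))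

-- ===== PRECONDITION & SPEC =====
def Spec_indice_palabras (frases : List String) (out : List (String × List Int)) : Prop := out = indice_palabras_alt frases
instance (frases : List String) (out : List (String × List Int)) : Decidable (Spec_indice_palabras frases out) := by unfold Spec_indice_palabras; infer_instance

-- ===== CLAIM (what is proved, stated in full; the proofs are below) =====
def Claim_equal_indice_palabras : Prop := ∀ (frases : List String), Dom_indice_palabras frases → Spec_indice_palabras frases (indice_palabras frases)

-- ===== LEMMAS AND PROOFS =====

-- A's per-token step (membership test, then insert-or-append) is the single modify step.
theorem stepA_eq_modify (d : PySem.Dict String (List Int)) (w : String) (n : Int) :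
    (if d.contains w = false then d.insert w [n] else d.modify w [] (fun v => v ++ [n]))
    = d.modify w [] (fun v => v ++ [n]) := by
  by_cases h : d.contains w = false
  · simp [h, PySem.Dict.modify, PySem.Dict.getD_of_not_contains d [] h]
  · simp [h]

-- A's nested loop over enumerated phrases equals the flat grouping loop over all (word, number) pairs.
theorem loopA_eq_flat (frases : List String) :
    (PySem.List.enumerate frases).foldl
      (fun d p =>
        ((PySem.Str.split? p.2 " ").getD []).foldl
          (fun d palabra =>
            if d.contains palabra = false then d.insert palabra [p.1 + 1]
            else d.modify palabra [] (fun v => v ++ [p.1 + 1]))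
          d)
      PySem.Dict.empty
    = ((PySem.List.enumerate frases).flatMap
        (fun p => ((PySem.Str.split? p.2 " ").getD []).map (fun palabra => (palabra, p.1 + 1)))).foldl
        (fun d q => d.modify q.1 [] (fun v => v ++ [q.2])) PySem.Dict.empty := by
  rw [List.foldl_flatMap]
  congr 1
  funext d p
  rw [List.foldl_map]
  congr 1
  funext d' w
  exact stepA_eq_modify d' w (p.1 + 1)

theorem indice_palabras_spec : Claim_equal_indice_palabras := by
  intro frases _
  show indice_palabras frases = indice_palabras_alt frases
  unfold indice_palabras indice_palabras_alt
  rw [loopA_eq_flat]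
  set pairs := (PySem.List.enumerate frases).flatMap
    (fun p => ((PySem.Str.split? p.2 " ").getD []).map (fun palabra => (palabra, p.1 + 1))) with hp
  have hnd : (pairs.foldl (fun d q => d.modify q.1 [] (fun v => v ++ [q.2]))
      PySem.Dict.empty).keys.Nodup :=
    PySem.Dict.nodup_keys_foldl_modify_key pairs (·.1) [] (fun _ q => (· ++ [q.2]))
      PySem.Dict.empty (by simp)
  rw [PySem.Dict.items_eq_map_keys _ hnd []]
  have hkeys : (pairs.foldl (fun d q => d.modify q.1 [] (fun v => v ++ [q.2]))
      PySem.Dict.empty).keys = PySem.List.dedup (pairs.map (·.1)) := by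
    rw [PySem.Dict.keys_foldl_modify_key pairs (·.1) [] (fun _ q => (· ++ [q.2]))
      PySem.Dict.empty, PySem.List.dedup_eq_ofList]
    simp [PySem.Set.update_nil_left, PySem.Set.ofList]
  rw [hkeys]
  refine List.map_congr_left (fun w _ => ?_)
  rw [PySem.Dict.getD_foldl_modify_append pairs PySem.Dict.empty w]
  simp
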